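-- pv_equiv track=rewrite | github.com/wojmichaluk/ASD-2022-2023 | offline/zad7/zad7.py | maze
-- ===== SOURCE A (Python) =====
-- def maze( L ):
--     n=len(L)
--     D=[[[-1,-1] for _ in range(n)] for _ in range(n)]
--     for i in range(n):
--         if can_move_to(L,i,0):
--             D[i][0][1]=i
--         else: break
--     for j in range(1,n):
--         for k in range(n):
--             m=max(D[k][j-1])
--             if m!=-1 and can_move_to(L,k,j):
--                 D[k][j]=[m+1,m+1]
--         for k in range(1,n):
--             if can_move_to(L,k,j) and D[k-1][j][1]!=-1:
--                 D[k][j][1]=max(D[k][j][1],D[k-1][j][1]+1)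
--         for k in range(n-2,-1,-1):
--             if can_move_to(L,k,j) and D[k+1][j][0]!=-1:
--                 D[k][j][0]=max(D[k][j][0],D[k+1][j][0]+1)
--     return max(D[n-1][n-1])
--
-- def can_move_to(L,x,y):
--     return L[x][y]!='#'
-- ===== SOURCE B (Python) =====
-- def maze(L):
--     # Different decomposition: keep only the per-column "best path length" array M
--     # (A keeps a full n x n matrix of (down, up) pairs and three sweeps per column).
--     # Each column is split into maximal runs of open cells; within a run, the value
--     # at row t is the best entry value e[p] plus the vertical distance |t - p|.
--     n = len(L)
--     # column 0: walk down from row 0 until the first wall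
--     M = []
--     for k in range(n):
--         if L[k][0] == '#':
--             M.extend([-1] * (n - k))
--             break
--         M.append(k)
--     for j in range(1, n):
--         e = [M[k] + 1 if M[k] != -1 and L[k][j] != '#' else -1 for k in range(n)]
--         M = [-1] * n
--         a = 0
--         while a < n:
--             if L[a][j] == '#':
--                 a += 1
--                 continue
--             b = a
--             while b < n and L[b][j] != '#':
--                 b += 1
--             for t in range(a, b):
--                 M[t] = max((e[p] + abs(t - p) for p in range(a, b) if e[p] != -1),
--                            default=-1)
--             a = b
--     return M[n - 1]
-- ===== Notes on version B (the rewrite author's own statement) =====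
-- stated objective: alternative
-- what changed: A fills an n x n matrix of (down,up) pairs with three sweeps per column; B keeps a single per-column value array, splits each column into maximal runs of open cells and computes each cell directly as max over the run's entry points of entry value plus vertical distance.
import Mathlib
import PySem

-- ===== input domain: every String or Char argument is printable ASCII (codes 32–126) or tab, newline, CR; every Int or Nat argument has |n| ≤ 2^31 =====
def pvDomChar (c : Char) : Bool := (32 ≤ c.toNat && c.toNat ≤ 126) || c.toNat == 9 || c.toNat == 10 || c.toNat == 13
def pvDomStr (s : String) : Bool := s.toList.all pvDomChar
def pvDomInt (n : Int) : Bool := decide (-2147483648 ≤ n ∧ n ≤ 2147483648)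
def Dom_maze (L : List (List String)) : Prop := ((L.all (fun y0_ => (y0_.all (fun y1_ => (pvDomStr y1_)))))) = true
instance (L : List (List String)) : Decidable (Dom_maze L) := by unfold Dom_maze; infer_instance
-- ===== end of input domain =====

-- B re-implements A's three per-column sweeps over an n×n matrix of (down,up) pairs by a
-- run-decomposition of each column keeping only one value per row; equivalence of return values.

-- ===== PORT A =====
-- can_move_to(L,x,y): L[x][y] != '#'.  Indices at every call site are in range under Pre_maze,
-- so the defaults of getD are never consulted there (exact on the admitted domain).
def canMoveTo (L : List (List String)) (x y : Nat) : Bool := ((L.getD x []).getD y "#") != "#"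

-- D[k][j] (a Python 2-element list [d,u], ported as the pair (d,u))
def pvGetP (D : List (List (Int × Int))) (k j : Nat) : Int × Int := (D.getD k []).getD j (-1, -1)

-- D[k][j] = v
def pvSetP (D : List (List (Int × Int))) (k j : Nat) (v : Int × Int) : List (List (Int × Int)) :=
  D.set k ((D.getD k []).set j v)

-- first loop: 'for i in range(n): if can_move_to: D[i][0][1]=i else: break'
def mazeCol0 (L : List (List String)) (n : Nat) (D : List (List (Int × Int))) (i : Nat) :
    List (List (Int × Int)) :=
  if _h : i < n then
    if canMoveTo L i 0 then
      mazeCol0 L n (pvSetP D i 0 ((pvGetP D i 0).1, (i : Int))) (i + 1)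
    else D
  else D
  termination_by n - i
  decreasing_by omega

-- 'for k in range(n): m=max(D[k][j-1]); if m!=-1 and can_move_to(L,k,j): D[k][j]=[m+1,m+1]'
def mazeLoop1 (L : List (List String)) (n j : Nat) (D : List (List (Int × Int))) :
    List (List (Int × Int)) :=
  (List.range n).foldl (fun D k =>
    let m := max (pvGetP D k (j - 1)).1 (pvGetP D k (j - 1)).2
    if m ≠ -1 ∧ canMoveTo L k j then pvSetP D k j (m + 1, m + 1) else D) D

-- 'for k in range(1,n): if can_move_to(L,k,j) and D[k-1][j][1]!=-1: D[k][j][1]=max(...)'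
def mazeLoop2 (L : List (List String)) (n j : Nat) (D : List (List (Int × Int))) :
    List (List (Int × Int)) :=
  (List.range' 1 (n - 1)).foldl (fun D k =>
    if canMoveTo L k j ∧ (pvGetP D (k - 1) j).2 ≠ -1 then
      pvSetP D k j ((pvGetP D k j).1, max (pvGetP D k j).2 ((pvGetP D (k - 1) j).2 + 1))
    else D) D

-- 'for k in range(n-2,-1,-1): …' (range(n-2,-1,-1) = [n-2,…,0] = (List.range (n-1)).reverse)
def mazeLoop3 (L : List (List String)) (n j : Nat) (D : List (List (Int × Int))) :
    List (List (Int × Int)) :=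
  ((List.range (n - 1)).reverse).foldl (fun D k =>
    if canMoveTo L k j ∧ (pvGetP D (k + 1) j).1 ≠ -1 then
      pvSetP D k j (max (pvGetP D k j).1 ((pvGetP D (k + 1) j).1 + 1), (pvGetP D k j).2)
    else D) D

def maze (L : List (List String)) : Int :=
  let n := L.length
  let D0 : List (List (Int × Int)) := List.replicate n (List.replicate n (-1, -1))
  let D1 := mazeCol0 L n D0 0
  -- 'for j in range(1,n): …'
  let D2 := (List.range' 1 (n - 1)).foldl (fun D j => mazeLoop3 L n j (mazeLoop2 L n j (mazeLoop1 L n j D))) D1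
  max (pvGetP D2 (n - 1) (n - 1)).1 (pvGetP D2 (n - 1) (n - 1)).2

-- ===== PORT B =====
-- column 0 of Source B: walk down from row 0, append k while open, pad with -1 after the first wall
def bCol0 (L : List (List String)) (n k : Nat) : List Int :=
  if _h : k < n then
    if ((L.getD k []).getD 0 "#") == "#" then List.replicate (n - k) (-1)
    else (k : Int) :: bCol0 L n (k + 1)
  else []
  termination_by n - k
  decreasing_by omega

-- inner 'while b < n and L[b][j] != '#'': first closed row ≥ b (or n)
def bFindEnd (L : List (List String)) (n j b : Nat) : Nat :=
  if _h : b < n then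
    if ((L.getD b []).getD j "#") != "#" then bFindEnd L n j (b + 1) else b
  else b
  termination_by n - b
  decreasing_by omega

theorem bFindEnd_ge (L : List (List String)) (n j b : Nat) : b ≤ bFindEnd L n j b := by
  fun_induction bFindEnd with
  | case1 _ _ ih => omega
  | case2 => omega
  | case3 => omega

-- 'max((e[p] + abs(t - p) for p in range(a, b) if e[p] != -1), default=-1)'
def bRunMax (e : List Int) (a b t : Nat) : Int :=
  (List.range' a (b - a)).foldl (fun acc p =>
    if e.getD p (-1) ≠ -1 then max acc (e.getD p (-1) + |(t : Int) - (p : Int)|) else acc) (-1)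

-- outer 'while a < n' of Source B: emit -1 for a closed row, else one whole run [a,b)
def bCol (L : List (List String)) (n j : Nat) (e : List Int) (a : Nat) : List Int :=
  if _h : a < n then
    if hc : ((L.getD a []).getD j "#") == "#" then (-1 : Int) :: bCol L n j e (a + 1)
    else
      let b := bFindEnd L n j a
      ((List.range' a (b - a)).map (fun t => bRunMax e a b t)) ++ bCol L n j e b
  else []
  termination_by n - a
  decreasing_by
  · omega
  · have h1 := bFindEnd_ge L n j (a + 1)
    have h2 : bFindEnd L n j a = bFindEnd L n j (a + 1) := by
      have hne : (L.getD a []).getD j "#" ≠ "#" := by simpa using hc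
      rw [bFindEnd, dif_pos _h, if_pos (by simpa using hne)]
    omega

def maze_alt (L : List (List String)) : Int :=
  let n := L.length
  let M0 := bCol0 L n 0
  let M := (List.range' 1 (n - 1)).foldl (fun M j =>
    let e := (List.range n).map (fun k =>
      if M.getD k (-1) ≠ -1 ∧ ((L.getD k []).getD j "#") != "#" then M.getD k (-1) + 1 else -1)
    bCol L n j e 0) M0
  M.getD (n - 1) (-1)

-- ===== PRECONDITION & SPEC =====
-- Pre_maze excludes exactly the inputs where A raises an IndexError: the empty list (D[-1][-1])
-- and grids with a row shorter than len(L) (L[k][j] out of range).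
def Pre_maze (L : List (List String)) : Prop :=
  L ≠ [] ∧ ∀ r ∈ L, L.length ≤ r.length
instance (L : List (List String)) : Decidable (Pre_maze L) := by unfold Pre_maze; infer_instance

def pvWitness_maze : List (List String) := [[".", "#"], [".", "."]]

def Spec_maze (L : List (List String)) (out : Int) : Prop := out = maze_alt L
instance (L : List (List String)) (out : Int) : Decidable (Spec_maze L out) := by
  unfold Spec_maze; infer_instance

-- ===== CLAIM (what is proved, stated in full; the proofs are below) =====
def Claim_equal_maze : Prop := ∀ (L : List (List String)), Dom_maze L → Pre_maze L → Spec_maze L (maze L)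

-- ===== LEMMAS AND PROOFS =====

-- cell openness, shared spec-side name for the accessor both ports use
def opn (L : List (List String)) (k j : Nat) : Bool := ((L.getD k []).getD j "#") != "#"

-- the value of column j, row k, 'up' component (A's second sweep; reads rows top-down)
def upF (op : Nat → Bool) (e : Nat → Int) : Nat → Int
  | 0 => e 0
  | k + 1 => if op (k + 1) ∧ upF op e k ≠ -1 then max (e (k + 1)) (upF op e k + 1) else e (k + 1)

-- the 'down' component (A's third sweep; reads rows bottom-up, bounded by n)
def downF (op : Nat → Bool) (e : Nat → Int) (n k : Nat) : Int :=
  if _h : k + 1 < n then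
    if op k ∧ downF op e n (k + 1) ≠ -1 then max (e k) (downF op e n (k + 1) + 1) else e k
  else e k
  termination_by n - k
  decreasing_by omega

def colv (op : Nat → Bool) (e : Nat → Int) (n k : Nat) : Int :=
  max (downF op e n k) (upF op e k)

def reach0 (L : List (List String)) (k : Nat) : Bool :=
  (List.range (k + 1)).all (fun i => opn L i 0)

def specFirst (L : List (List String)) (k : Nat) : Int :=
  if reach0 L k then (k : Int) else -1

def entF (op : Nat → Bool) (m : Nat → Int) (k : Nat) : Int :=
  if m k ≠ -1 ∧ op k then m k + 1 else -1

-- the common mathematical description of the columns: specCol L n j k = best value at (k, j)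
def specCol (L : List (List String)) (n : Nat) : Nat → Nat → Int
  | 0 => specFirst L
  | j + 1 => colv (fun r => opn L r (j + 1)) (entF (fun r => opn L r (j + 1)) (specCol L n j)) n

-- ---- matrix access lemmas ----

theorem pvSetP_length (D : List (List (Int × Int))) (k j : Nat) (v : Int × Int) :
    (pvSetP D k j v).length = D.length := by
  simp [pvSetP]

theorem pvSetP_rows (D : List (List (Int × Int))) (k j : Nat) (v : Int × Int) (n : Nat)
    (h : ∀ r ∈ D, r.length = n) : ∀ r ∈ pvSetP D k j v, r.length = n := by
  by_cases hk : k < D.length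
  · intro r hr
    rcases List.mem_or_eq_of_mem_set hr with h1 | h1
    · exact h r h1
    · subst h1
      simp [List.getD, List.getElem?_eq_getElem hk, h _ (List.getElem_mem hk)]
  · rw [pvSetP, List.set_eq_of_length_le (by omega : D.length ≤ k)]
    exact h

theorem pvGetP_set_same (D : List (List (Int × Int))) (k j : Nat) (v : Int × Int)
    (hk : k < D.length) (hj : j < (D.getD k []).length) :
    pvGetP (pvSetP D k j v) k j = v := by
  have hj' : j < (D[k]?.getD []).length := by simpa [List.getD] using hj
  simp [pvGetP, pvSetP, List.getD, List.getElem?_set_self hk, List.getElem?_set_self hj']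

theorem pvGetP_set_ne (D : List (List (Int × Int))) (k j k' j' : Nat) (v : Int × Int)
    (h : k' ≠ k ∨ j' ≠ j) :
    pvGetP (pvSetP D k j v) k' j' = pvGetP D k' j' := by
  rcases h with h | h
  · simp [pvGetP, pvSetP, List.getD, List.getElem?_set_ne (Ne.symm h)]
  · by_cases hk : k' = k
    · subst hk
      by_cases hlt : k' < D.length
      · simp [pvGetP, pvSetP, List.getD, List.getElem?_set_self hlt,
          List.getElem?_set_ne (Ne.symm h)]
      · simp [pvGetP, pvSetP, List.set_eq_of_length_le (by omega : D.length ≤ k')]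
    · simp [pvGetP, pvSetP, List.getD, List.getElem?_set_ne (Ne.symm hk)]

-- ---- generic guarded max-fold lemmas (the shape of B's 'max(..., default=-1)') ----

theorem foldl_gmax_ge (l : List Nat) (f : Nat → Int) (g : Nat → Prop) [DecidablePred g] (acc : Int) :
    acc ≤ l.foldl (fun acc p => if g p then max acc (f p) else acc) acc := by
  induction l generalizing acc with
  | nil => simp
  | cons x l ih =>
    refine le_trans ?_ (ih _)
    by_cases h : g x <;> simp [h]

theorem foldl_gmax_le_mem (l : List Nat) (f : Nat → Int) (g : Nat → Prop) [DecidablePred g] (acc : Int)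
    (p : Nat) (hp : p ∈ l) (hg : g p) :
    f p ≤ l.foldl (fun acc p => if g p then max acc (f p) else acc) acc := by
  induction l generalizing acc with
  | nil => simp at hp
  | cons x l ih =>
    rcases List.mem_cons.mp hp with h | h
    · subst h
      refine le_trans ?_ (foldl_gmax_ge l f g _)
      simp [hg]
    · exact ih _ h

theorem foldl_gmax_att (l : List Nat) (f : Nat → Int) (g : Nat → Prop) [DecidablePred g] (acc : Int) :
    l.foldl (fun acc p => if g p then max acc (f p) else acc) acc = acc ∨
      ∃ p ∈ l, g p ∧
        l.foldl (fun acc p => if g p then max acc (f p) else acc) acc = f p := by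
  induction l generalizing acc with
  | nil => simp
  | cons x l ih =>
    simp only [List.foldl_cons]
    by_cases h : g x
    · simp only [h, if_true]
      rcases ih (max acc (f x)) with h1 | ⟨p, hp, hg, h1⟩
      · rcases max_cases acc (f x) with ⟨hm, _⟩ | ⟨hm, _⟩
        · left; rw [h1, hm]
        · right; exact ⟨x, by simp, h, by rw [h1, hm]⟩
      · right; exact ⟨p, by simp [hp], hg, h1⟩
    · simp only [h]
      rcases ih acc with h1 | ⟨p, hp, hg, h1⟩
      · left; exact h1
      · right; exact ⟨p, by simp [hp], hg, h1⟩

-- ---- basic facts about upF / downF ----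

theorem upF_ge (op : Nat → Bool) (e : Nat → Int) (he : ∀ k, -1 ≤ e k) (t : Nat) :
    -1 ≤ upF op e t := by
  induction t with
  | zero => exact he 0
  | succ t ih =>
    rw [upF]
    split
    · exact le_trans (he (t + 1)) (le_max_left _ _)
    · exact he (t + 1)

theorem upF_congr (op : Nat → Bool) (e e' : Nat → Int) (t : Nat)
    (h : ∀ p, p ≤ t → e p = e' p) : upF op e t = upF op e' t := by
  induction t with
  | zero => exact h 0 (by omega)
  | succ t ih =>
    rw [upF, upF, ih (fun p hp => h p (by omega)), h (t + 1) le_rfl]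

theorem downF_congr_aux (op : Nat → Bool) (e e' : Nat → Int) (n : Nat) :
    ∀ d k, n - k ≤ d → k < n → (∀ p, k ≤ p → p < n → e p = e' p) →
      downF op e n k = downF op e' n k := by
  intro d
  induction d with
  | zero => intro k h1 h2 _; omega
  | succ d ih =>
    intro k hd hk h
    conv_lhs => rw [downF]
    conv_rhs => rw [downF]
    by_cases h1 : k + 1 < n
    · have ihk := ih (k + 1) (by omega) h1 (fun p hp1 hp2 => h p (by omega) hp2)
      rw [dif_pos h1, dif_pos h1, ihk, h k le_rfl hk]
    · rw [dif_neg h1, dif_neg h1, h k le_rfl hk]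

theorem downF_congr (op : Nat → Bool) (e e' : Nat → Int) (n k : Nat) (hk : k < n)
    (h : ∀ p, k ≤ p → p < n → e p = e' p) : downF op e n k = downF op e' n k :=
  downF_congr_aux op e e' n (n - k) k le_rfl hk h

-- ---- run characterization of upF / downF ----

theorem upF_base (op : Nat → Bool) (e : Nat → Int) (a : Nat)
    (ha : a = 0 ∨ (op (a - 1) = false ∧ e (a - 1) = -1)) : upF op e a = e a := by
  rcases ha with ha | ⟨h1, h2⟩
  · subst ha; rfl
  · cases a with
    | zero => rfl
    | succ a =>
      simp only [Nat.add_sub_cancel] at h1 h2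
      have hup : upF op e a = -1 := by
        cases a with
        | zero => exact h2
        | succ a' =>
          rw [upF, if_neg]
          · exact h2
          · rintro ⟨hop, _⟩
            rw [h1] at hop
            cases hop
      rw [upF, if_neg]
      rintro ⟨_, hne⟩
      exact hne hup

theorem upF_lb (op : Nat → Bool) (e : Nat → Int) (p : Nat)
    (he : e p ≠ -1) (hege : ∀ k, -1 ≤ e k) :
    ∀ t, p ≤ t → (∀ s, p < s → s ≤ t → op s = true) →
      e p + ((t : Int) - (p : Int)) ≤ upF op e t := by
  intro t
  induction t with
  | zero =>
    intro hp _
    have : p = 0 := by omega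
    subst this
    simp [upF]
  | succ t ih =>
    intro hp hopen
    by_cases hpt : p = t + 1
    · subst hpt
      have h1 : -1 ≤ upF op e (t + 1) := upF_ge op e hege _
      have h2 : e (t + 1) ≤ upF op e (t + 1) := by
        rw [upF]; split
        · exact le_max_left _ _
        · exact le_rfl
      omega
    · have hpt' : p ≤ t := by omega
      have hup := ih hpt' (fun s h1 h2 => hopen s h1 (by omega))
      have hne : upF op e t ≠ -1 := by
        have : (0 : Int) ≤ e p := by have := hege p; omega
        omega
      rw [upF, if_pos ⟨hopen (t + 1) (by omega) le_rfl, hne⟩]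
      have : e p + ((t : Int) + 1 - p) ≤ upF op e t + 1 := by push_cast at hup; omega
      refine le_trans this (le_trans (le_max_right _ _) le_rfl)

theorem upF_att (op : Nat → Bool) (e : Nat → Int) (a : Nat)
    (hbase : upF op e a = e a) (hege : ∀ k, -1 ≤ e k) :
    ∀ t, a ≤ t →
      upF op e t = -1 ∨
        ∃ p, a ≤ p ∧ p ≤ t ∧ e p ≠ -1 ∧ upF op e t = e p + ((t : Int) - (p : Int)) := by
  intro t
  induction t with
  | zero =>
    intro ha
    have : a = 0 := by omega
    subst this
    by_cases h : e 0 = -1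
    · left; rw [hbase, h]
    · right; exact ⟨0, le_rfl, le_rfl, h, by rw [hbase]; simp⟩
  | succ t ih =>
    intro ha
    by_cases hat : a = t + 1
    · subst hat
      by_cases h : e (t + 1) = -1
      · left; rw [hbase, h]
      · right; exact ⟨t + 1, le_rfl, le_rfl, h, by rw [hbase]; simp⟩
    · have ha' : a ≤ t := by omega
      rw [upF]
      split
      · rename_i hcond
        rcases ih ha' with h1 | ⟨p, hp1, hp2, hp3, hp4⟩
        · exact absurd h1 hcond.2
        · rcases max_cases (e (t + 1)) (upF op e t + 1) with ⟨hm, _⟩ | ⟨hm, hle⟩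
          · right
            refine ⟨t + 1, by omega, le_rfl, ?_, by rw [hm]; simp⟩
            intro hc
            have h0 : (0 : Int) ≤ e p := by have := hege p; omega
            have : (0 : Int) ≤ upF op e t := by rw [hp4]; omega
            omega
          · right
            exact ⟨p, hp1, by omega, hp3, by rw [hm, hp4]; push_cast; omega⟩
      · by_cases h : e (t + 1) = -1
        · left; exact h
        · right; exact ⟨t + 1, by omega, le_rfl, h, by simp⟩

theorem downF_eq_of_closed (op : Nat → Bool) (e : Nat → Int) (n b : Nat)
    (h1 : op b = false) : downF op e n b = e b := by
  rw [downF]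
  split
  · rw [if_neg]; simp [h1]
  · rfl

theorem downF_base (op : Nat → Bool) (e : Nat → Int) (n b : Nat) (hb1 : 1 ≤ b)
    (hb : b = n ∨ (op b = false ∧ e b = -1)) : downF op e n (b - 1) = e (b - 1) := by
  rcases hb with hb | ⟨h1, h2⟩
  · rw [downF, dif_neg (by omega)]
  · rw [downF]
    split
    · rename_i hlt
      have hbeq : b - 1 + 1 = b := by omega
      rw [if_neg]
      rw [hbeq, downF_eq_of_closed op e n b h1, h2]
      simp
    · rfl

theorem downF_lb (op : Nat → Bool) (e : Nat → Int) (n p : Nat)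
    (he : e p ≠ -1) (hege : ∀ k, -1 ≤ e k) (hpn : p < n) :
    ∀ d t, p - t ≤ d → t ≤ p → (∀ s, t ≤ s → s < p → op s = true) →
      e p + ((p : Int) - (t : Int)) ≤ downF op e n t := by
  intro d
  induction d with
  | zero =>
    intro t hd ht _
    have : t = p := by omega
    subst this
    have h1 : e t ≤ downF op e n t := by
      rw [downF]
      split
      · split
        · exact le_max_left _ _
        · exact le_rfl
      · exact le_rfl
    simpa using h1
  | succ d ih =>
    intro t hd ht hopen
    by_cases htp : t = p
    · exact ih t (by omega) (by omega) hopen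
    · have ht' : t + 1 ≤ p := by omega
      have hdown := ih (t + 1) (by omega) ht' (fun s h1 h2 => hopen s (by omega) h2)
      have hne : downF op e n (t + 1) ≠ -1 := by
        have : (0 : Int) ≤ e p := by have := hege p; omega
        have : (0 : Int) ≤ e p + ((p : Int) - (t + 1 : Nat)) := by push_cast; omega
        omega
      rw [downF, dif_pos (by omega : t + 1 < n),
        if_pos ⟨hopen t le_rfl (by omega), hne⟩]
      refine le_trans ?_ (le_max_right _ _)
      push_cast at hdown ⊢
      omega

theorem downF_att (op : Nat → Bool) (e : Nat → Int) (n b : Nat) (hb1 : 1 ≤ b) (hbn : b ≤ n)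
    (hbase : downF op e n (b - 1) = e (b - 1)) (hege : ∀ k, -1 ≤ e k) :
    ∀ d t, b - 1 - t ≤ d → t ≤ b - 1 →
      downF op e n t = -1 ∨
        ∃ p, t ≤ p ∧ p ≤ b - 1 ∧ e p ≠ -1 ∧ downF op e n t = e p + ((p : Int) - (t : Int)) := by
  intro d
  induction d with
  | zero =>
    intro t hd ht
    have htb : t = b - 1 := by omega
    by_cases h : e t = -1
    · left; rw [htb, hbase, ← htb]; exact h
    · right
      refine ⟨t, le_rfl, ht, h, ?_⟩
      rw [htb, hbase, ← htb]
      simp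
  | succ d ih =>
    intro t hd ht
    by_cases htb : t = b - 1
    · exact ih t (by omega) (by omega)
    · have ht' : t + 1 ≤ b - 1 := by omega
      rw [downF, dif_pos (by omega : t + 1 < n)]
      split
      · rename_i hcond
        rcases ih (t + 1) (by omega) ht' with h1 | ⟨p, hp1, hp2, hp3, hp4⟩
        · exact absurd h1 hcond.2
        · rcases max_cases (e t) (downF op e n (t + 1) + 1) with ⟨hm, _⟩ | ⟨hm, hle⟩
          · right
            refine ⟨t, le_rfl, by omega, ?_, by rw [hm]; simp⟩
            intro hc
            have h0 : (0 : Int) ≤ e p := by have := hege p; omega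
            have : (0 : Int) ≤ downF op e n (t + 1) := by rw [hp4]; push_cast; omega
            omega
          · right
            exact ⟨p, by omega, hp2, hp3, by rw [hm, hp4]; push_cast; omega⟩
      · by_cases h : e t = -1
        · left; exact h
        · right; exact ⟨t, le_rfl, by omega, h, by simp⟩

-- ---- the core run lemma: A's two sweeps = B's direct double scan over one run ----

theorem run_eq (op : Nat → Bool) (e : List Int) (n a b t : Nat)
    (hat : a ≤ t) (htb : t < b) (hbn : b ≤ n)
    (hopen : ∀ s, a ≤ s → s < b → op s = true)
    (hstart : a = 0 ∨ op (a - 1) = false)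
    (hend : b = n ∨ op b = false)
    (heclosed : ∀ k, op k = false → e.getD k (-1) = -1)
    (hege : ∀ k, -1 ≤ e.getD k (-1)) :
    colv op (fun k => e.getD k (-1)) n t = bRunMax e a b t := by
  set eF : Nat → Int := fun k => e.getD k (-1) with heF
  have hbase_up : upF op eF a = eF a := by
    refine upF_base op eF a ?_
    rcases hstart with h | h
    · exact Or.inl h
    · exact Or.inr ⟨h, heclosed _ h⟩
  have hbase_down : downF op eF n (b - 1) = eF (b - 1) := by
    refine downF_base op eF n b (by omega) ?_
    rcases hend with h | h
    · exact Or.inl h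
    · exact Or.inr ⟨h, heclosed _ h⟩
  have hmem : ∀ p, a ≤ p → p < b → p ∈ List.range' a (b - a) := by
    intro p h1 h2
    rw [List.mem_range']
    exact ⟨p - a, by omega, by omega⟩
  -- ≤ : both components are attained values (or -1), each bounded by the fold
  have hle : colv op eF n t ≤ bRunMax e a b t := by
    have hge : (-1 : Int) ≤ bRunMax e a b t := foldl_gmax_ge _ _ _ _
    have hup : upF op eF t ≤ bRunMax e a b t := by
      rcases upF_att op eF a hbase_up hege t hat with h1 | ⟨p, hp1, hp2, hp3, hp4⟩
      · omega
      · rw [hp4]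
        have := foldl_gmax_le_mem (List.range' a (b - a))
          (fun p => e.getD p (-1) + |(t : Int) - (p : Int)|)
          (fun p => e.getD p (-1) ≠ -1) (-1) p
          (hmem p hp1 (by omega)) hp3
        rw [bRunMax]
        have habs : |(t : Int) - (p : Int)| = (t : Int) - (p : Int) := by
          rw [abs_of_nonneg]; omega
        simpa [habs] using this
    have hdn : downF op eF n t ≤ bRunMax e a b t := by
      rcases downF_att op eF n b (by omega) hbn hbase_down hege (b - 1 - t) t le_rfl
          (by omega) with h1 | ⟨p, hp1, hp2, hp3, hp4⟩
      · omega
      · rw [hp4]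
        have := foldl_gmax_le_mem (List.range' a (b - a))
          (fun p => e.getD p (-1) + |(t : Int) - (p : Int)|)
          (fun p => e.getD p (-1) ≠ -1) (-1) p
          (hmem p (by omega) (by omega)) hp3
        rw [bRunMax]
        have habs : |(t : Int) - (p : Int)| = (p : Int) - (t : Int) := by
          rw [abs_of_nonpos (by omega)]; omega
        simpa [habs] using this
    exact max_le hdn hup
  -- ≥ : the fold's value is -1 or some e p + |t-p|, each bounded by up/down
  have hge : bRunMax e a b t ≤ colv op eF n t := by
    have hup_ge : (-1 : Int) ≤ upF op eF t := upF_ge op eF hege t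
    rcases foldl_gmax_att (List.range' a (b - a))
        (fun p => e.getD p (-1) + |(t : Int) - (p : Int)|)
        (fun p => e.getD p (-1) ≠ -1) (-1) with h1 | ⟨p, hp, hg, h1⟩
    · rw [bRunMax, h1]
      exact le_trans hup_ge (le_max_right _ _)
    · rw [bRunMax, h1]
      have hpmem := List.mem_range'.mp hp
      obtain ⟨i, hi, hpi⟩ := hpmem
      have hpa : a ≤ p := by omega
      have hpb : p < b := by omega
      have hpne : e.getD p (-1) ≠ -1 := hg
      by_cases hpt : p ≤ t
      · have habs : |(t : Int) - (p : Int)| = (t : Int) - (p : Int) := by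
          rw [abs_of_nonneg]; omega
        rw [habs]
        refine le_trans (upF_lb op eF p hpne hege t hpt
          (fun s h1 h2 => hopen s (by omega) (by omega))) (le_max_right _ _)
      · have habs : |(t : Int) - (p : Int)| = (p : Int) - (t : Int) := by
          rw [abs_of_nonpos (by omega)]; omega
        rw [habs]
        refine le_trans (downF_lb op eF n p hpne hege (by omega) (p - t) t le_rfl (by omega)
          (fun s h1 h2 => hopen s (by omega) (by omega))) (le_max_left _ _)
  omega

-- ---- characterizing B's helpers ----

theorem bFindEnd_le (L : List (List String)) (n j b : Nat) (hb : b ≤ n) :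
    bFindEnd L n j b ≤ n := by
  fun_induction bFindEnd with
  | case1 b h hc ih => exact ih (by omega)
  | case2 b h hc => omega
  | case3 b h => omega

theorem bFindEnd_open (L : List (List String)) (n j b : Nat) :
    ∀ t, b ≤ t → t < bFindEnd L n j b → opn L t j = true := by
  fun_induction bFindEnd with
  | case1 b h hc ih =>
    intro t h1 h2
    by_cases hbt : t = b
    · subst hbt; exact hc
    · exact ih t (by omega) h2
  | case2 b h hc =>
    intro t h1 h2; omega
  | case3 b h =>
    intro t h1 h2; omega

theorem bFindEnd_closed (L : List (List String)) (n j b : Nat)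
    (h : bFindEnd L n j b < n) (hb : b ≤ bFindEnd L n j b) :
    opn L (bFindEnd L n j b) j = false := by
  fun_induction bFindEnd with
  | case1 b hlt hc ih => exact ih h (bFindEnd_ge L n j (b + 1))
  | case2 b hlt hc => simpa [opn] using hc
  | case3 b hlt => omega

theorem bFindEnd_step (L : List (List String)) (n j b : Nat) (hb : b < n)
    (hc : opn L b j = true) : bFindEnd L n j b = bFindEnd L n j (b + 1) := by
  rw [bFindEnd, dif_pos hb]
  exact if_pos hc

theorem bCol0_get (L : List (List String)) (n : Nat) :
    ∀ i k, (bCol0 L n i).getD k (-1) =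
      if i + k < n ∧ ((List.range' i (k + 1)).all (fun t => opn L t 0)) = true
      then ((i + k : Nat) : Int) else -1 := by
  intro i
  fun_induction bCol0 L n i with
  | case1 i h hc =>
    intro k
    rw [if_neg]
    · simp
    · rintro ⟨h1, h2⟩
      have hmem : i ∈ List.range' i (k + 1) := by
        rw [List.mem_range']; exact ⟨0, by omega, by omega⟩
      have := (List.all_eq_true.mp h2) i hmem
      simp [opn] at this
      simp at hc
      exact this hc
  | case2 i h hc ih =>
    intro k
    cases k with
    | zero =>
      rw [if_pos]
      · simp
      · constructor
        · omega
        · simp [List.range'_succ, List.all_cons]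
          simpa [opn] using hc
    | succ k =>
      have hopn : opn L i 0 = true := by simpa [opn] using hc
      have hall : ((List.range' i (k + 1 + 1)).all (fun t => opn L t 0))
          = ((List.range' (i + 1) (k + 1)).all (fun t => opn L t 0)) := by
        rw [List.range'_succ, List.all_cons, hopn, Bool.true_and]
      simp only [List.getD_cons_succ]
      rw [ih k]
      by_cases hcond : i + 1 + k < n ∧ ((List.range' (i + 1) (k + 1)).all (fun t => opn L t 0)) = true
      · rw [if_pos hcond, if_pos ⟨by omega, by rw [hall]; exact hcond.2⟩]
        congr 1
        omega
      · rw [if_neg hcond, if_neg]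
        rintro ⟨h1, h2⟩
        rw [hall] at h2
        exact hcond ⟨by omega, h2⟩
  | case3 i h =>
    intro k
    rw [if_neg (by omega)]
    simp

theorem upF_closed (op : Nat → Bool) (e : Nat → Int) (k : Nat) (hk : op k = false) :
    upF op e k = e k := by
  cases k with
  | zero => rfl
  | succ k =>
    rw [upF, if_neg]
    rintro ⟨h1, _⟩
    rw [hk] at h1
    cases h1

theorem colv_closed (op : Nat → Bool) (e : Nat → Int) (n k : Nat)
    (hk : op k = false) (he : e k = -1) : colv op e n k = -1 := by
  rw [colv, upF_closed op e k hk, downF_eq_of_closed op e n k hk, he]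
  simp

theorem bCol_get_aux (L : List (List String)) (n j : Nat) (e : List Int)
    (heclosed : ∀ k, opn L k j = false → e.getD k (-1) = -1)
    (hege : ∀ k, -1 ≤ e.getD k (-1)) :
    ∀ d a, n - a ≤ d → (a = 0 ∨ opn L (a - 1) j = false ∨ opn L a j = false) →
      ∀ i, (bCol L n j e a).getD i (-1) =
        if a + i < n then colv (fun r => opn L r j) (fun k => e.getD k (-1)) n (a + i) else -1 := by
  intro d
  induction d with
  | zero =>
    intro a hd _ i
    rw [bCol, dif_neg (by omega), if_neg (by omega)]
    simp
  | succ d ih =>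
    intro a hd hbd i
    by_cases han : a < n
    · by_cases hop : opn L a j = true
      · -- open row: a run [a, b) is emitted in one block
        have hcbeq : ¬ ((L.getD a []).getD j "#" == "#") = true := by
          simpa [opn] using hop
        rw [bCol, dif_pos han, dif_neg hcbeq]
        set b := bFindEnd L n j a with hbdef
        have hb1 : b = bFindEnd L n j (a + 1) := bFindEnd_step L n j a han hop
        have hab : a < b := by rw [hb1]; have := bFindEnd_ge L n j (a + 1); omega
        have hbn : b ≤ n := bFindEnd_le L n j a (by omega)
        have hopen : ∀ s, a ≤ s → s < b → opn L s j = true := bFindEnd_open L n j a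
        have hend : b = n ∨ opn L b j = false := by
          by_cases hblt : b < n
          · exact Or.inr (bFindEnd_closed L n j a hblt (bFindEnd_ge L n j a))
          · left; omega
        have hstart : a = 0 ∨ opn L (a - 1) j = false := by
          rcases hbd with h | h | h
          · exact Or.inl h
          · exact Or.inr h
          · rw [h] at hop; cases hop
        have hseglen : (List.range' a (b - a)).length = b - a := by simp
        by_cases hi : i < b - a
        · have hlen : i < ((List.range' a (b - a)).map (fun t => bRunMax e a b t)).length := by
            simpa using hi
          rw [List.getD_eq_getElem?_getD, List.getElem?_append_left hlen,
            List.getElem?_eq_getElem hlen]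
          simp only [List.getElem_map]
          have hidx : (List.range' a (b - a))[i]'(by simpa using hi) = a + i :=
            List.getElem_range'_1 i (by simpa using hi)
          rw [hidx, Option.getD_some, if_pos (by omega)]
          exact (run_eq (fun r => opn L r j) e n a b (a + i) (by omega) (by omega) hbn
            hopen hstart hend heclosed hege).symm
        · have hlen : ((List.range' a (b - a)).map (fun t => bRunMax e a b t)).length ≤ i := by
            simpa using hi
          rw [List.getD_eq_getElem?_getD, List.getElem?_append_right hlen,
            ← List.getD_eq_getElem?_getD]
          simp only [List.length_map, hseglen]
          rcases hend with hbeq | hclosed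
          · rw [bCol, dif_neg (by omega), if_neg (by omega)]
            simp
          · rw [ih b (by omega) (Or.inr (Or.inr hclosed)) (i - (b - a))]
            have harg : b + (i - (b - a)) = a + i := by omega
            rw [harg]
      · -- closed row: a single -1 cell
        have hcbeq : ((L.getD a []).getD j "#" == "#") = true := by
          simp [opn] at hop
          simpa using hop
        have hopf : opn L a j = false := by simpa using hop
        rw [bCol, dif_pos han, dif_pos hcbeq]
        cases i with
        | zero =>
          rw [List.getD_cons_zero, if_pos (by omega)]
          exact (colv_closed _ _ n a hopf (heclosed a hopf)).symm
        | succ i =>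
          rw [List.getD_cons_succ, ih (a + 1) (by omega) (Or.inr (Or.inl (by simpa using hopf))) i]
          have harg : a + 1 + i = a + (i + 1) := by omega
          rw [harg]
    · rw [bCol, dif_neg han, if_neg (by omega)]
      simp

-- ---- characterizing A's loops ----

theorem rowlen (D : List (List (Int × Int))) (n : Nat) (hD : D.length = n)
    (hrow : ∀ r ∈ D, r.length = n) (k : Nat) (hk : k < n) : (D.getD k []).length = n := by
  have hk' : k < D.length := by omega
  have : D.getD k [] = D[k] := by simp [List.getD, List.getElem?_eq_getElem hk']
  rw [this]
  exact hrow _ (List.getElem_mem hk')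

theorem mazeCol0_get (L : List (List String)) (n : Nat) :
    ∀ D i, D.length = n → (∀ r ∈ D, r.length = n) →
      (mazeCol0 L n D i).length = n ∧ (∀ r ∈ mazeCol0 L n D i, r.length = n) ∧
      ∀ k h, pvGetP (mazeCol0 L n D i) k h =
        if h = 0 ∧ i ≤ k ∧ k < n ∧ ((List.range' i (k + 1 - i)).all (fun t => opn L t 0)) = true
        then ((pvGetP D k 0).1, (k : Int)) else pvGetP D k h := by
  intro D i
  fun_induction mazeCol0 L n D i with
  | case1 D i hlt hcan ih =>
    intro hD hrow
    have hD' : (pvSetP D i 0 ((pvGetP D i 0).1, (i : Int))).length = n := by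
      rw [pvSetP_length]; exact hD
    have hrow' := pvSetP_rows D i 0 ((pvGetP D i 0).1, (i : Int)) n hrow
    obtain ⟨hl, hr, hchar⟩ := ih hD' hrow'
    refine ⟨hl, hr, ?_⟩
    intro k h
    rw [hchar k h]
    have hset_same : pvGetP (pvSetP D i 0 ((pvGetP D i 0).1, (i : Int))) i 0
        = ((pvGetP D i 0).1, (i : Int)) :=
      pvGetP_set_same D i 0 _ (by omega) (by rw [rowlen D n hD hrow i hlt]; omega)
    have hopn : opn L i 0 = true := hcan
    by_cases hc1 : h = 0 ∧ i + 1 ≤ k ∧ k < n ∧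
        ((List.range' (i + 1) (k + 1 - (i + 1))).all (fun t => opn L t 0)) = true
    · obtain ⟨he0, hik, hkn, hall⟩ := hc1
      have hall' : ((List.range' i (k + 1 - i)).all (fun t => opn L t 0)) = true := by
        have h2 : k + 1 - i = (k + 1 - (i + 1)) + 1 := by omega
        rw [h2, List.range'_succ, List.all_cons, hopn, Bool.true_and]
        exact hall
      rw [if_pos ⟨he0, hik, hkn, hall⟩, if_pos ⟨he0, by omega, hkn, hall'⟩,
        pvGetP_set_ne D i 0 k 0 _ (Or.inl (by omega))]
    · rw [if_neg hc1]
      by_cases hc2 : k = i ∧ h = 0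
      · obtain ⟨hk2, hh⟩ := hc2
        subst hk2
        subst hh
        have hall1 : ((List.range' k (k + 1 - k)).all (fun t => opn L t 0)) = true := by
          have h2 : k + 1 - k = 1 := by omega
          rw [h2]
          simpa using hopn
        rw [hset_same, if_pos ⟨rfl, le_rfl, hlt, hall1⟩]
      · have hne : ¬(k = i ∧ h = 0) := hc2
        rw [pvGetP_set_ne D i 0 k h _ (by tauto)]
        rw [if_neg]
        rintro ⟨hh0, hik, hkn, hall⟩
        by_cases hki : k = i
        · exact hne ⟨hki, hh0⟩
        · refine hc1 ⟨hh0, by omega, hkn, ?_⟩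
          have : k + 1 - i = (k + 1 - (i + 1)) + 1 := by omega
          rw [this, List.range'_succ, List.all_cons, hopn, Bool.true_and] at hall
          exact hall
  | case2 D i hlt hcan =>
    intro hD hrow
    refine ⟨hD, hrow, ?_⟩
    intro k h
    rw [if_neg]
    rintro ⟨hh0, hik, hkn, hall⟩
    have hmem : i ∈ List.range' i (k + 1 - i) := by
      rw [List.mem_range']; exact ⟨0, by omega, by omega⟩
    have := (List.all_eq_true.mp hall) i hmem
    have hcan' : opn L i 0 = true := this
    exact hcan hcan'
  | case3 D i hlt =>
    intro hD hrow
    refine ⟨hD, hrow, ?_⟩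
    intro k h
    rw [if_neg]
    rintro ⟨_, hik, hkn, _⟩
    omega

theorem mazeLoop1_get (L : List (List String)) (n j : Nat) (hj1 : 1 ≤ j) (hjn : j < n)
    (D : List (List (Int × Int))) (hD : D.length = n) (hrow : ∀ r ∈ D, r.length = n) :
    ∀ r, r ≤ n →
      (mazeLoop1 L r j D).length = n ∧ (∀ row ∈ mazeLoop1 L r j D, row.length = n) ∧
      ∀ k h, pvGetP (mazeLoop1 L r j D) k h =
        if h = j ∧ k < r ∧
            (max (pvGetP D k (j - 1)).1 (pvGetP D k (j - 1)).2 ≠ -1 ∧ canMoveTo L k j = true)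
        then (max (pvGetP D k (j - 1)).1 (pvGetP D k (j - 1)).2 + 1,
              max (pvGetP D k (j - 1)).1 (pvGetP D k (j - 1)).2 + 1)
        else pvGetP D k h := by
  intro r
  induction r with
  | zero =>
    intro _
    refine ⟨by simpa [mazeLoop1] using hD, by simpa [mazeLoop1] using hrow, ?_⟩
    intro k h
    rw [if_neg (by omega)]
    simp [mazeLoop1]
  | succ r ih =>
    intro hr
    obtain ⟨hl, hro, hchar⟩ := ih (by omega)
    have hstep : mazeLoop1 L (r + 1) j D =
        (fun D k =>
          let m := max (pvGetP D k (j - 1)).1 (pvGetP D k (j - 1)).2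
          if m ≠ -1 ∧ canMoveTo L k j then pvSetP D k j (m + 1, m + 1) else D)
          (mazeLoop1 L r j D) r := by
      rw [mazeLoop1, mazeLoop1, List.range_succ, List.foldl_append, List.foldl_cons,
        List.foldl_nil]
    have hmr : pvGetP (mazeLoop1 L r j D) r (j - 1) = pvGetP D r (j - 1) := by
      rw [hchar r (j - 1), if_neg (by omega)]
    by_cases hcond : max (pvGetP D r (j - 1)).1 (pvGetP D r (j - 1)).2 ≠ -1 ∧
        canMoveTo L r j = true
    · have hbody : mazeLoop1 L (r + 1) j D =
          pvSetP (mazeLoop1 L r j D) r j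
            (max (pvGetP D r (j - 1)).1 (pvGetP D r (j - 1)).2 + 1,
             max (pvGetP D r (j - 1)).1 (pvGetP D r (j - 1)).2 + 1) := by
        rw [hstep]
        simp only [hmr]
        rw [if_pos hcond]
      refine ⟨by rw [hbody, pvSetP_length]; exact hl,
        by rw [hbody]; exact pvSetP_rows _ r j _ n hro, ?_⟩
      intro k h
      rw [hbody]
      by_cases hkh : k = r ∧ h = j
      · obtain ⟨hk2, hh2⟩ := hkh
        subst hk2
        subst hh2
        rw [pvGetP_set_same _ k h _ (by omega) (by rw [rowlen _ n hl hro k (by omega)]; omega),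
          if_pos ⟨rfl, by omega, hcond⟩]
      · rw [pvGetP_set_ne _ r j k h _ (by tauto), hchar k h]
        by_cases hc2 : h = j ∧ k < r ∧
            (max (pvGetP D k (j - 1)).1 (pvGetP D k (j - 1)).2 ≠ -1 ∧ canMoveTo L k j = true)
        · rw [if_pos hc2, if_pos ⟨hc2.1, by omega, hc2.2.2⟩]
        · rw [if_neg hc2, if_neg]
          rintro ⟨hh2, hk2, hcc⟩
          refine hc2 ⟨hh2, ?_, hcc⟩
          rcases Nat.lt_succ_iff_lt_or_eq.mp hk2 with h2 | h2
          · exact h2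
          · exact absurd ⟨h2, hh2⟩ hkh
    · have hbody : mazeLoop1 L (r + 1) j D = mazeLoop1 L r j D := by
        rw [hstep]
        simp only [hmr]
        rw [if_neg hcond]
      refine ⟨by rw [hbody]; exact hl, by rw [hbody]; exact hro, ?_⟩
      intro k h
      rw [hbody, hchar k h]
      by_cases hc2 : h = j ∧ k < r ∧
          (max (pvGetP D k (j - 1)).1 (pvGetP D k (j - 1)).2 ≠ -1 ∧ canMoveTo L k j = true)
      · rw [if_pos hc2, if_pos ⟨hc2.1, by omega, hc2.2.2⟩]
      · rw [if_neg hc2, if_neg]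
        rintro ⟨hh2, hk2, hcc⟩
        refine hc2 ⟨hh2, ?_, hcc⟩
        rcases Nat.lt_succ_iff_lt_or_eq.mp hk2 with h2 | h2
        · exact h2
        · subst h2; exact absurd hcc hcond

theorem mazeLoop2_get (L : List (List String)) (n j : Nat) (hjn : j < n)
    (D : List (List (Int × Int))) (hD : D.length = n) (hrow : ∀ r ∈ D, r.length = n) :
    ∀ m, m ≤ n - 1 →
      ((List.range' 1 m).foldl (fun D k =>
        if canMoveTo L k j ∧ (pvGetP D (k - 1) j).2 ≠ -1 then
          pvSetP D k j ((pvGetP D k j).1, max (pvGetP D k j).2 ((pvGetP D (k - 1) j).2 + 1))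
        else D) D).length = n ∧
      (∀ row ∈ (List.range' 1 m).foldl (fun D k =>
        if canMoveTo L k j ∧ (pvGetP D (k - 1) j).2 ≠ -1 then
          pvSetP D k j ((pvGetP D k j).1, max (pvGetP D k j).2 ((pvGetP D (k - 1) j).2 + 1))
        else D) D, row.length = n) ∧
      ∀ k h, pvGetP ((List.range' 1 m).foldl (fun D k =>
        if canMoveTo L k j ∧ (pvGetP D (k - 1) j).2 ≠ -1 then
          pvSetP D k j ((pvGetP D k j).1, max (pvGetP D k j).2 ((pvGetP D (k - 1) j).2 + 1))
        else D) D) k h =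
        if h = j ∧ 1 ≤ k ∧ k ≤ m
        then ((pvGetP D k j).1,
              upF (fun t => canMoveTo L t j) (fun t => (pvGetP D t j).2) k)
        else pvGetP D k h := by
  intro m
  induction m with
  | zero =>
    intro _
    refine ⟨by simpa using hD, by simpa using hrow, ?_⟩
    intro k h
    rw [if_neg (by omega)]
    simp
  | succ m ih =>
    intro hm
    obtain ⟨hl, hro, hchar⟩ := ih (by omega)
    have hconcat : List.range' 1 (m + 1) = List.range' 1 m ++ [1 + m] :=
      List.range'_1_concat
    rw [hconcat, List.foldl_append, List.foldl_cons, List.foldl_nil]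
    set R := (List.range' 1 m).foldl (fun D k =>
        if canMoveTo L k j ∧ (pvGetP D (k - 1) j).2 ≠ -1 then
          pvSetP D k j ((pvGetP D k j).1, max (pvGetP D k j).2 ((pvGetP D (k - 1) j).2 + 1))
        else D) D with hR
    have hm0 : 1 + m - 1 = m := by omega
    have hsnd : (pvGetP R m j).2 =
        upF (fun t => canMoveTo L t j) (fun t => (pvGetP D t j).2) m := by
      rw [hchar m j]
      by_cases h1 : 1 ≤ m
      · rw [if_pos ⟨rfl, h1, le_rfl⟩]
      · have h0 : m = 0 := by omega
        subst h0
        rw [if_neg (by omega)]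
        rfl
    have hcur : pvGetP R (1 + m) j = pvGetP D (1 + m) j := by
      rw [hchar (1 + m) j, if_neg (by omega)]
    have hup : upF (fun t => canMoveTo L t j) (fun t => (pvGetP D t j).2) (1 + m) =
        if canMoveTo L (1 + m) j = true ∧
            upF (fun t => canMoveTo L t j) (fun t => (pvGetP D t j).2) m ≠ -1
        then max (pvGetP D (1 + m) j).2
              (upF (fun t => canMoveTo L t j) (fun t => (pvGetP D t j).2) m + 1)
        else (pvGetP D (1 + m) j).2 := by
      rw [show 1 + m = m + 1 by omega, upF]
    by_cases hcond : canMoveTo L (1 + m) j = true ∧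
        upF (fun t => canMoveTo L t j) (fun t => (pvGetP D t j).2) m ≠ -1
    · have hbody : (if canMoveTo L (1 + m) j ∧ (pvGetP R (1 + m - 1) j).2 ≠ -1 then
            pvSetP R (1 + m) j
              ((pvGetP R (1 + m) j).1,
               max (pvGetP R (1 + m) j).2 ((pvGetP R (1 + m - 1) j).2 + 1))
          else R) =
          pvSetP R (1 + m) j ((pvGetP D (1 + m) j).1,
            max (pvGetP D (1 + m) j).2
              (upF (fun t => canMoveTo L t j) (fun t => (pvGetP D t j).2) m + 1)) := by
        rw [hm0, hsnd, hcur, if_pos hcond]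
      rw [hbody]
      refine ⟨by rw [pvSetP_length]; exact hl, pvSetP_rows _ _ _ _ n hro, ?_⟩
      intro k h
      by_cases hkh : k = 1 + m ∧ h = j
      · obtain ⟨hk2, hh2⟩ := hkh
        subst hk2
        subst hh2
        rw [pvGetP_set_same _ _ _ _ (by omega) (by rw [rowlen _ n hl hro _ (by omega)]; omega),
          if_pos ⟨rfl, by omega, by omega⟩, hup, if_pos hcond]
      · rw [pvGetP_set_ne _ _ _ _ _ _ (by tauto), hchar k h]
        by_cases hc2 : h = j ∧ 1 ≤ k ∧ k ≤ m
        · rw [if_pos hc2, if_pos ⟨hc2.1, hc2.2.1, by omega⟩]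
        · rw [if_neg hc2, if_neg]
          rintro ⟨hh2, hk1, hk2⟩
          rcases Nat.lt_or_ge k (m + 1) with h2 | h2
          · exact hc2 ⟨hh2, hk1, by omega⟩
          · exact hkh ⟨by omega, hh2⟩
    · have hbody : (if canMoveTo L (1 + m) j ∧ (pvGetP R (1 + m - 1) j).2 ≠ -1 then
            pvSetP R (1 + m) j
              ((pvGetP R (1 + m) j).1,
               max (pvGetP R (1 + m) j).2 ((pvGetP R (1 + m - 1) j).2 + 1))
          else R) = R := by
        rw [hm0, hsnd, if_neg hcond]
      rw [hbody]
      refine ⟨hl, hro, ?_⟩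
      intro k h
      rw [hchar k h]
      by_cases hc2 : h = j ∧ 1 ≤ k ∧ k ≤ m
      · rw [if_pos hc2, if_pos ⟨hc2.1, hc2.2.1, by omega⟩]
      · by_cases hkh : k = 1 + m ∧ h = j
        · obtain ⟨hk2, hh2⟩ := hkh
          subst hk2
          subst hh2
          rw [if_neg hc2, if_pos ⟨rfl, by omega, by omega⟩, hup, if_neg hcond]
        · rw [if_neg hc2, if_neg]
          rintro ⟨hh2, hk1, hk2⟩
          rcases Nat.lt_or_ge k (m + 1) with h2 | h2
          · exact hc2 ⟨hh2, hk1, by omega⟩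
          · exact hkh ⟨by omega, hh2⟩

theorem mazeLoop3_aux (L : List (List String)) (n j : Nat) (hjn : j < n) (E : Nat → Int) :
    ∀ m, m ≤ n - 1 →
      ∀ D, D.length = n → (∀ r ∈ D, r.length = n) →
        (∀ t, t < m → (pvGetP D t j).1 = E t) →
        (∀ t, m ≤ t → t < n →
          (pvGetP D t j).1 = downF (fun s => canMoveTo L s j) E n t) →
        (((List.range m).reverse).foldl (fun D k =>
          if canMoveTo L k j ∧ (pvGetP D (k + 1) j).1 ≠ -1 then
            pvSetP D k j (max (pvGetP D k j).1 ((pvGetP D (k + 1) j).1 + 1), (pvGetP D k j).2)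
          else D) D).length = n ∧
        (∀ row ∈ ((List.range m).reverse).foldl (fun D k =>
          if canMoveTo L k j ∧ (pvGetP D (k + 1) j).1 ≠ -1 then
            pvSetP D k j (max (pvGetP D k j).1 ((pvGetP D (k + 1) j).1 + 1), (pvGetP D k j).2)
          else D) D, row.length = n) ∧
        ∀ k h, pvGetP (((List.range m).reverse).foldl (fun D k =>
          if canMoveTo L k j ∧ (pvGetP D (k + 1) j).1 ≠ -1 then
            pvSetP D k j (max (pvGetP D k j).1 ((pvGetP D (k + 1) j).1 + 1), (pvGetP D k j).2)
          else D) D) k h =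
          if h = j ∧ k < m
          then (downF (fun s => canMoveTo L s j) E n k, (pvGetP D k j).2)
          else pvGetP D k h := by
  intro m
  induction m with
  | zero =>
    intro _ D hD hrow _ _
    refine ⟨by simpa using hD, by simpa using hrow, ?_⟩
    intro k h
    rw [if_neg (by omega)]
    simp
  | succ m ih =>
    intro hm D hD hrow H1 H2
    have hmn : m + 1 < n := by omega
    have hrev : (List.range (m + 1)).reverse = m :: (List.range m).reverse := by
      simp [List.range_succ]
    rw [hrev, List.foldl_cons]
    have hread : (pvGetP D (m + 1) j).1 = downF (fun s => canMoveTo L s j) E n (m + 1) :=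
      H2 (m + 1) (by omega) hmn
    have hfst : (pvGetP D m j).1 = E m := H1 m (by omega)
    have hdm : downF (fun s => canMoveTo L s j) E n m =
        if canMoveTo L m j = true ∧ downF (fun s => canMoveTo L s j) E n (m + 1) ≠ -1
        then max (E m) (downF (fun s => canMoveTo L s j) E n (m + 1) + 1) else E m := by
      rw [downF, dif_pos hmn]
    set D2 := (if canMoveTo L m j ∧ (pvGetP D (m + 1) j).1 ≠ -1 then
        pvSetP D m j (max (pvGetP D m j).1 ((pvGetP D (m + 1) j).1 + 1), (pvGetP D m j).2)
      else D) with hD2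
    have hD2len : D2.length = n := by
      rw [hD2]
      split
      · rw [pvSetP_length]; exact hD
      · exact hD
    have hD2row : ∀ r ∈ D2, r.length = n := by
      rw [hD2]
      split
      · exact pvSetP_rows _ _ _ _ n hrow
      · exact hrow
    have hD2get : ∀ k h, pvGetP D2 k h =
        if k = m ∧ h = j
        then (downF (fun s => canMoveTo L s j) E n m, (pvGetP D m j).2)
        else pvGetP D k h := by
      intro k h
      rw [hD2]
      by_cases hcond : canMoveTo L m j = true ∧ (pvGetP D (m + 1) j).1 ≠ -1
      · rw [if_pos hcond]
        by_cases hkh : k = m ∧ h = j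
        · rw [hkh.1, hkh.2, if_pos ⟨rfl, rfl⟩,
            pvGetP_set_same D m j _ (by omega)
              (by rw [rowlen D n hD hrow m (by omega)]; omega),
            hfst, hdm, if_pos ⟨hcond.1, by rw [← hread]; exact hcond.2⟩, hread]
        · rw [pvGetP_set_ne D m j k h _ (by tauto), if_neg hkh]
      · rw [if_neg hcond]
        by_cases hkh : k = m ∧ h = j
        · have hneg : ¬(canMoveTo L m j = true ∧
              downF (fun s => canMoveTo L s j) E n (m + 1) ≠ -1) := by
            rw [← hread]
            intro hc
            exact hcond hc
          rw [hkh.1, hkh.2, if_pos ⟨rfl, rfl⟩, hdm, if_neg hneg, ← hfst]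
        · rw [if_neg hkh]
    obtain ⟨hl, hro, hchar⟩ := ih (by omega) D2 hD2len hD2row
      (fun t ht => by rw [hD2get t j, if_neg (by omega)]; exact H1 t (by omega))
      (fun t ht1 ht2 => by
        by_cases htm : t = m
        · subst htm
          rw [hD2get t j, if_pos ⟨rfl, rfl⟩]
        · rw [hD2get t j, if_neg (by omega)]
          exact H2 t (by omega) ht2)
    refine ⟨hl, hro, ?_⟩
    intro k h
    rw [hchar k h]
    by_cases hc1 : h = j ∧ k < m
    · rw [hc1.1, if_pos ⟨rfl, hc1.2⟩, if_pos ⟨rfl, by omega⟩, hD2get k j, if_neg (by omega)]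
    · by_cases hkh : k = m ∧ h = j
      · rw [if_neg hc1, hkh.1, hkh.2, hD2get m j, if_pos ⟨rfl, rfl⟩,
          if_pos ⟨rfl, by omega⟩]
      · rw [if_neg hc1, hD2get k h, if_neg hkh, if_neg (by
          rintro ⟨hh2, hk2⟩
          rcases Nat.lt_or_ge k m with h2 | h2
          · exact hc1 ⟨hh2, h2⟩
          · exact hkh ⟨by omega, hh2⟩)]

theorem mazeStep_get (L : List (List String)) (n j : Nat) (hj1 : 1 ≤ j) (hjn : j < n)
    (D : List (List (Int × Int))) (hD : D.length = n) (hrow : ∀ r ∈ D, r.length = n)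
    (hcur : ∀ k, k < n → pvGetP D k j = (-1, -1)) :
    (mazeLoop3 L n j (mazeLoop2 L n j (mazeLoop1 L n j D))).length = n ∧
    (∀ r ∈ mazeLoop3 L n j (mazeLoop2 L n j (mazeLoop1 L n j D)), r.length = n) ∧
    (∀ k, k < n → pvGetP (mazeLoop3 L n j (mazeLoop2 L n j (mazeLoop1 L n j D))) k j =
      (downF (fun t => canMoveTo L t j)
        (entF (fun t => canMoveTo L t j)
          (fun t => max (pvGetP D t (j - 1)).1 (pvGetP D t (j - 1)).2)) n k,
       upF (fun t => canMoveTo L t j)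
        (entF (fun t => canMoveTo L t j)
          (fun t => max (pvGetP D t (j - 1)).1 (pvGetP D t (j - 1)).2)) k)) ∧
    (∀ k h, h ≠ j → pvGetP (mazeLoop3 L n j (mazeLoop2 L n j (mazeLoop1 L n j D))) k h =
      pvGetP D k h) := by
  obtain ⟨hl1, hro1, hchar1⟩ := mazeLoop1_get L n j hj1 hjn D hD hrow n le_rfl
  have e1 : ∀ k, k < n → pvGetP (mazeLoop1 L n j D) k j =
      (entF (fun t => canMoveTo L t j)
        (fun t => max (pvGetP D t (j - 1)).1 (pvGetP D t (j - 1)).2) k,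
       entF (fun t => canMoveTo L t j)
        (fun t => max (pvGetP D t (j - 1)).1 (pvGetP D t (j - 1)).2) k) := by
    intro k hk
    by_cases hc : max (pvGetP D k (j - 1)).1 (pvGetP D k (j - 1)).2 ≠ -1 ∧
        canMoveTo L k j = true
    · rw [hchar1 k j, if_pos ⟨rfl, hk, hc⟩]
      simp only [entF]
      rw [if_pos hc]
    · rw [hchar1 k j, if_neg (by tauto), hcur k hk]
      simp only [entF]
      rw [if_neg hc]
  have u1 : ∀ k h, h ≠ j → pvGetP (mazeLoop1 L n j D) k h = pvGetP D k h := by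
    intro k h hh
    rw [hchar1 k h, if_neg (by tauto)]
  obtain ⟨hl2, hro2, hchar2⟩ :=
    mazeLoop2_get L n j hjn (mazeLoop1 L n j D) hl1 hro1 (n - 1) le_rfl
  have hfold2 : mazeLoop2 L n j (mazeLoop1 L n j D) =
      (List.range' 1 (n - 1)).foldl (fun D k =>
        if canMoveTo L k j ∧ (pvGetP D (k - 1) j).2 ≠ -1 then
          pvSetP D k j ((pvGetP D k j).1, max (pvGetP D k j).2 ((pvGetP D (k - 1) j).2 + 1))
        else D) (mazeLoop1 L n j D) := by
    rw [mazeLoop2]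
  have e2 : ∀ k, k < n →
      pvGetP (mazeLoop2 L n j (mazeLoop1 L n j D)) k j =
      (entF (fun t => canMoveTo L t j)
        (fun t => max (pvGetP D t (j - 1)).1 (pvGetP D t (j - 1)).2) k,
       upF (fun t => canMoveTo L t j)
        (entF (fun t => canMoveTo L t j)
          (fun t => max (pvGetP D t (j - 1)).1 (pvGetP D t (j - 1)).2)) k) := by
    intro k hk
    rw [hfold2, hchar2 k j]
    have hcong : upF (fun t => canMoveTo L t j)
        (fun t => (pvGetP (mazeLoop1 L n j D) t j).2) k =
        upF (fun t => canMoveTo L t j)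
          (entF (fun t => canMoveTo L t j)
            (fun t => max (pvGetP D t (j - 1)).1 (pvGetP D t (j - 1)).2)) k := by
      refine upF_congr _ _ _ k ?_
      intro p hp
      rw [e1 p (by omega)]
    by_cases h1 : 1 ≤ k
    · rw [if_pos ⟨rfl, h1, by omega⟩, hcong, e1 k hk]
    · have h0 : k = 0 := by omega
      subst h0
      rw [if_neg (by omega), e1 0 hk]
      rfl
  have u2 : ∀ k h, h ≠ j →
      pvGetP (mazeLoop2 L n j (mazeLoop1 L n j D)) k h = pvGetP D k h := by
    intro k h hh
    rw [hfold2, hchar2 k h, if_neg (by tauto)]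
    exact u1 k h hh
  have hl2' : (mazeLoop2 L n j (mazeLoop1 L n j D)).length = n := by rw [hfold2]; exact hl2
  have hro2' : ∀ r ∈ mazeLoop2 L n j (mazeLoop1 L n j D), r.length = n := by
    rw [hfold2]; exact hro2
  obtain ⟨hl3, hro3, hchar3⟩ := mazeLoop3_aux L n j hjn
    (fun t => (pvGetP (mazeLoop2 L n j (mazeLoop1 L n j D)) t j).1) (n - 1) le_rfl
    (mazeLoop2 L n j (mazeLoop1 L n j D)) hl2' hro2'
    (fun t _ => rfl)
    (fun t ht1 ht2 => by
      have ht : t = n - 1 := by omega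
      subst ht
      rw [downF, dif_neg (by omega)])
  have hfold3 : mazeLoop3 L n j (mazeLoop2 L n j (mazeLoop1 L n j D)) =
      ((List.range (n - 1)).reverse).foldl (fun D k =>
        if canMoveTo L k j ∧ (pvGetP D (k + 1) j).1 ≠ -1 then
          pvSetP D k j (max (pvGetP D k j).1 ((pvGetP D (k + 1) j).1 + 1), (pvGetP D k j).2)
        else D) (mazeLoop2 L n j (mazeLoop1 L n j D)) := by
    rw [mazeLoop3]
  have hEe : ∀ p, p < n →
      (pvGetP (mazeLoop2 L n j (mazeLoop1 L n j D)) p j).1 =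
      entF (fun t => canMoveTo L t j)
        (fun t => max (pvGetP D t (j - 1)).1 (pvGetP D t (j - 1)).2) p := by
    intro p hp
    rw [e2 p hp]
  refine ⟨by rw [hfold3]; exact hl3, by rw [hfold3]; exact hro3, ?_, ?_⟩
  · intro k hk
    rw [hfold3, hchar3 k j]
    by_cases hk1 : k < n - 1
    · rw [if_pos ⟨rfl, hk1⟩,
        downF_congr _ _ _ n k hk (fun p hp1 hp2 => hEe p hp2)]
      have hsnd : (pvGetP (mazeLoop2 L n j (mazeLoop1 L n j D)) k j).2 =
          upF (fun t => canMoveTo L t j)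
            (entF (fun t => canMoveTo L t j)
              (fun t => max (pvGetP D t (j - 1)).1 (pvGetP D t (j - 1)).2)) k := by
        rw [e2 k hk]
      rw [hsnd]
    · have hk2 : k = n - 1 := by omega
      rw [if_neg (by omega), e2 k hk]
      have hdk : downF (fun t => canMoveTo L t j)
          (entF (fun t => canMoveTo L t j)
            (fun t => max (pvGetP D t (j - 1)).1 (pvGetP D t (j - 1)).2)) n k =
          entF (fun t => canMoveTo L t j)
            (fun t => max (pvGetP D t (j - 1)).1 (pvGetP D t (j - 1)).2) k := by
        rw [downF, dif_neg (by omega)]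
      rw [hdk]
  · intro k h hh
    rw [hfold3, hchar3 k h, if_neg (by tauto)]
    exact u2 k h hh

-- ---- assembling both programs against specCol ----

theorem specFirst_ge (L : List (List String)) (k : Nat) : -1 ≤ specFirst L k := by
  rw [specFirst]
  split
  · omega
  · omega

theorem entF_ge (op : Nat → Bool) (m : Nat → Int) (k : Nat) (hm : -1 ≤ m k) :
    -1 ≤ entF op m k := by
  rw [entF]
  split
  · omega
  · omega

theorem specCol_ge (L : List (List String)) (n : Nat) :
    ∀ j k, -1 ≤ specCol L n j k := by
  intro j
  induction j with
  | zero => exact specFirst_ge L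
  | succ j ih =>
    intro k
    rw [specCol, colv]
    refine le_trans (upF_ge _ _ (fun t => entF_ge _ _ t (ih t)) k) (le_max_right _ _)

theorem pvGetP_replicate (n k h : Nat) :
    pvGetP (List.replicate n (List.replicate n ((-1 : Int), (-1 : Int)))) k h = (-1, -1) := by
  rw [pvGetP]
  simp only [List.getD, List.getElem?_replicate]
  split_ifs
  · simp [List.getElem?_replicate]
    split_ifs <;> simp
  · simp

theorem mazeA_spec (L : List (List String)) (hn : 1 ≤ L.length) :
    maze L = specCol L L.length (L.length - 1) (L.length - 1) := by
  have hD0len : (List.replicate L.length (List.replicate L.length ((-1 : Int), (-1 : Int)))).length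
      = L.length := by simp
  have hD0row : ∀ r ∈ List.replicate L.length (List.replicate L.length ((-1 : Int), (-1 : Int))),
      r.length = L.length := by
    intro r hr
    rw [List.eq_of_mem_replicate hr]
    simp
  obtain ⟨hl0, hro0, hchar0⟩ := mazeCol0_get L L.length _ 0 hD0len hD0row
  have hglob : ∀ m, m ≤ L.length - 1 →
      ((List.range' 1 m).foldl
        (fun D j => mazeLoop3 L L.length j (mazeLoop2 L L.length j (mazeLoop1 L L.length j D)))
        (mazeCol0 L L.length
          (List.replicate L.length (List.replicate L.length ((-1 : Int), (-1 : Int)))) 0)).length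
        = L.length ∧
      (∀ r ∈ (List.range' 1 m).foldl
        (fun D j => mazeLoop3 L L.length j (mazeLoop2 L L.length j (mazeLoop1 L L.length j D)))
        (mazeCol0 L L.length
          (List.replicate L.length (List.replicate L.length ((-1 : Int), (-1 : Int)))) 0),
        r.length = L.length) ∧
      (∀ k, k < L.length →
        max (pvGetP ((List.range' 1 m).foldl
          (fun D j => mazeLoop3 L L.length j (mazeLoop2 L L.length j (mazeLoop1 L L.length j D)))
          (mazeCol0 L L.length
            (List.replicate L.length (List.replicate L.length ((-1 : Int), (-1 : Int)))) 0)) k m).1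
          (pvGetP ((List.range' 1 m).foldl
          (fun D j => mazeLoop3 L L.length j (mazeLoop2 L L.length j (mazeLoop1 L L.length j D)))
          (mazeCol0 L L.length
            (List.replicate L.length (List.replicate L.length ((-1 : Int), (-1 : Int)))) 0)) k m).2
          = specCol L L.length m k) ∧
      (∀ k h, k < L.length → m < h → h < L.length →
        pvGetP ((List.range' 1 m).foldl
          (fun D j => mazeLoop3 L L.length j (mazeLoop2 L L.length j (mazeLoop1 L L.length j D)))
          (mazeCol0 L L.length
            (List.replicate L.length (List.replicate L.length ((-1 : Int), (-1 : Int)))) 0)) k h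
          = (-1, -1)) := by
    intro m
    induction m with
    | zero =>
      intro _
      simp only [List.range'_zero, List.foldl_nil]
      refine ⟨hl0, hro0, ?_, ?_⟩
      · intro k hk
        rw [hchar0 k 0]
        rw [specCol, specFirst, reach0, List.range_eq_range']
        by_cases hall : ((List.range' 0 (k + 1)).all (fun t => opn L t 0)) = true
        · rw [if_pos ⟨rfl, by omega, hk, by simpa using hall⟩, if_pos hall,
            pvGetP_replicate]
          exact max_eq_right (by omega)
        · rw [if_neg (by
            rintro ⟨_, _, _, h4⟩
            exact hall (by simpa using h4)), if_neg hall, pvGetP_replicate]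
          simp
      · intro k h hk hh1 hh2
        rw [hchar0 k h, if_neg (by omega), pvGetP_replicate]
    | succ m ih =>
      intro hm
      obtain ⟨hl, hro, hmax, hfut⟩ := ih (by omega)
      rw [List.range'_1_concat, List.foldl_append, List.foldl_cons, List.foldl_nil]
      have h1m : 1 + m = m + 1 := by omega
      rw [h1m]
      obtain ⟨hl', hro', hpair', hunch'⟩ := mazeStep_get L L.length (m + 1) (by omega)
        (by omega) _ hl hro (fun k hk => hfut k (m + 1) hk (by omega) (by omega))
      refine ⟨hl', hro', ?_, ?_⟩
      · intro k hk
        rw [hpair' k hk]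
        have hme : m + 1 - 1 = m := by omega
        rw [specCol, colv]
        have hcongu : upF (fun t => canMoveTo L t (m + 1))
            (entF (fun t => canMoveTo L t (m + 1))
              (fun t => max (pvGetP ((List.range' 1 m).foldl
                (fun D j => mazeLoop3 L L.length j
                  (mazeLoop2 L L.length j (mazeLoop1 L L.length j D)))
                (mazeCol0 L L.length (List.replicate L.length
                  (List.replicate L.length ((-1 : Int), (-1 : Int)))) 0)) t (m + 1 - 1)).1
                (pvGetP ((List.range' 1 m).foldl
                (fun D j => mazeLoop3 L L.length j
                  (mazeLoop2 L L.length j (mazeLoop1 L L.length j D)))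
                (mazeCol0 L L.length (List.replicate L.length
                  (List.replicate L.length ((-1 : Int), (-1 : Int)))) 0)) t (m + 1 - 1)).2)) k =
            upF (fun t => opn L t (m + 1))
              (entF (fun t => opn L t (m + 1)) (specCol L L.length m)) k := by
          refine upF_congr _ _ _ k ?_
          intro p hp
          rw [entF, entF, hme, hmax p (by omega)]
          rfl
        have hcongd : downF (fun t => canMoveTo L t (m + 1))
            (entF (fun t => canMoveTo L t (m + 1))
              (fun t => max (pvGetP ((List.range' 1 m).foldl
                (fun D j => mazeLoop3 L L.length j
                  (mazeLoop2 L L.length j (mazeLoop1 L L.length j D)))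
                (mazeCol0 L L.length (List.replicate L.length
                  (List.replicate L.length ((-1 : Int), (-1 : Int)))) 0)) t (m + 1 - 1)).1
                (pvGetP ((List.range' 1 m).foldl
                (fun D j => mazeLoop3 L L.length j
                  (mazeLoop2 L L.length j (mazeLoop1 L L.length j D)))
                (mazeCol0 L L.length (List.replicate L.length
                  (List.replicate L.length ((-1 : Int), (-1 : Int)))) 0)) t (m + 1 - 1)).2))
              L.length k =
            downF (fun t => opn L t (m + 1))
              (entF (fun t => opn L t (m + 1)) (specCol L L.length m)) L.length k := by
          refine downF_congr _ _ _ L.length k hk ?_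
          intro p hp1 hp2
          rw [entF, entF, hme, hmax p (by omega)]
          rfl
        rw [hcongu, hcongd]
      · intro k h hk hh1 hh2
        rw [hunch' k h (by omega)]
        exact hfut k h hk (by omega) hh2
  obtain ⟨_, _, hmax, _⟩ := hglob (L.length - 1) le_rfl
  have := hmax (L.length - 1) (by omega)
  simp only [maze]
  exact this

theorem mazeB_spec (L : List (List String)) (hn : 1 ≤ L.length) :
    maze_alt L = specCol L L.length (L.length - 1) (L.length - 1) := by
  have hbase : ∀ k, (bCol0 L L.length 0).getD k (-1) =
      if k < L.length then specCol L L.length 0 k else -1 := by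
    intro k
    rw [bCol0_get L L.length 0 k]
    simp only [specCol]
    rw [specFirst, reach0, List.range_eq_range']
    simp only [Nat.zero_add]
    by_cases hk : k < L.length
    · by_cases hall : ((List.range' 0 (k + 1)).all (fun t => opn L t 0)) = true
      · rw [if_pos ⟨hk, hall⟩, if_pos hk, if_pos hall]
      · rw [if_neg (by tauto), if_pos hk, if_neg hall]
    · rw [if_neg (by tauto), if_neg hk]
  have hglobB : ∀ m, m ≤ L.length - 1 →
      ∀ k, ((List.range' 1 m).foldl (fun M j =>
          bCol L L.length j ((List.range L.length).map (fun k =>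
            if M.getD k (-1) ≠ -1 ∧ ((L.getD k []).getD j "#") != "#"
            then M.getD k (-1) + 1 else -1)) 0)
        (bCol0 L L.length 0)).getD k (-1) =
        if k < L.length then specCol L L.length m k else -1 := by
    intro m
    induction m with
    | zero =>
      intro _
      simpa using hbase
    | succ m ih =>
      intro hm
      rw [List.range'_1_concat, List.foldl_append, List.foldl_cons, List.foldl_nil]
      have h1m : 1 + m = m + 1 := by omega
      rw [h1m]
      intro k
      set M := (List.range' 1 m).foldl (fun M j =>
          bCol L L.length j ((List.range L.length).map (fun k =>
            if M.getD k (-1) ≠ -1 ∧ ((L.getD k []).getD j "#") != "#"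
            then M.getD k (-1) + 1 else -1)) 0) (bCol0 L L.length 0) with hM
      set eL := (List.range L.length).map (fun kk =>
          if M.getD kk (-1) ≠ -1 ∧ ((L.getD kk []).getD (m + 1) "#") != "#"
          then M.getD kk (-1) + 1 else -1) with heL
      have ihM : ∀ p, M.getD p (-1) = if p < L.length then specCol L L.length m p else -1 :=
        ih (by omega)
      have hePt : ∀ p, eL.getD p (-1) =
          if p < L.length
          then entF (fun t => opn L t (m + 1)) (specCol L L.length m) p else -1 := by
        intro p
        by_cases hp : p < L.length
        · rw [heL, PySem.List.getD_map_range _ _ _ _ hp, ihM p, if_pos hp, if_pos hp, entF]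
          by_cases hcc : specCol L L.length m p ≠ -1 ∧ opn L p (m + 1) = true
          · rw [if_pos hcc]
            exact if_pos hcc
          · rw [if_neg hcc]
            exact if_neg hcc
        · rw [if_neg hp, heL, List.getD_eq_getElem?_getD,
            List.getElem?_eq_none (by simpa using (by omega : L.length ≤ p))]
          rfl
      have heclosed : ∀ kk, opn L kk (m + 1) = false → eL.getD kk (-1) = -1 := by
        intro kk hkk
        rw [hePt kk]
        by_cases hp : kk < L.length
        · rw [if_pos hp, entF, if_neg (by rw [hkk]; tauto)]
        · rw [if_neg hp]
      have hege : ∀ kk, -1 ≤ eL.getD kk (-1) := by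
        intro kk
        rw [hePt kk]
        by_cases hp : kk < L.length
        · rw [if_pos hp]
          exact entF_ge _ _ kk (specCol_ge L L.length m kk)
        · rw [if_neg hp]
      rw [bCol_get_aux L L.length (m + 1) eL heclosed hege L.length 0 (by omega)
        (Or.inl rfl) k]
      simp only [Nat.zero_add]
      by_cases hk : k < L.length
      · rw [if_pos hk, if_pos hk, specCol, colv]
        have hcongu : upF (fun r => opn L r (m + 1)) (fun kk => eL.getD kk (-1)) k =
            upF (fun r => opn L r (m + 1))
              (entF (fun r => opn L r (m + 1)) (specCol L L.length m)) k := by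
          refine upF_congr _ _ _ k ?_
          intro p hp
          rw [hePt p, if_pos (by omega)]
        have hcongd : downF (fun r => opn L r (m + 1)) (fun kk => eL.getD kk (-1))
              L.length k =
            downF (fun r => opn L r (m + 1))
              (entF (fun r => opn L r (m + 1)) (specCol L L.length m)) L.length k := by
          refine downF_congr _ _ _ L.length k hk ?_
          intro p hp1 hp2
          rw [hePt p, if_pos (by omega)]
        rw [hcongu, hcongd]
        rfl
      · rw [if_neg hk, if_neg hk]
  have hfin := hglobB (L.length - 1) le_rfl (L.length - 1)
  simp only [maze_alt]
  rw [hfin, if_pos (by omega)]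

theorem maze_agree (L : List (List String)) : maze L = maze_alt L := by
  by_cases hn : L.length = 0
  · have hL : L = [] := List.length_eq_zero_iff.mp hn
    subst hL
    have h1 : maze [] = -1 := by
      simp only [maze]
      rw [mazeCol0]
      simp [pvGetP, List.getD]
    have h2 : maze_alt [] = -1 := by
      simp only [maze_alt]
      rw [bCol0]
      simp [List.getD]
    rw [h1, h2]
  · rw [mazeA_spec L (by omega), mazeB_spec L (by omega)]

-- ===== VERDICT (by name: the statement is the Claim_ definition above) =====
theorem maze_spec : Claim_equal_maze := by
  intro L _ _
  unfold Spec_maze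
  exact maze_agree L
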